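-- pv_equiv track=rewrite | github.com/santoshr1016/WeekendMasala | itsybitsy/TH/smart_news_prob2.py | solution
-- ===== SOURCE A (Python) =====
-- def solution(A):
--     # write your code in Python 3.6
--     tmp_list = []
--     count = 2
--     for item in A:
--         if item not in tmp_list:
--             tmp_list.append(item)
--         if len(tmp_list) == 2:
--             if item in tmp_list:
--                 count += 1
--             else:
--                 tmp_list.pop(0)
--                 count = 2
--     return count - 1
-- ===== SOURCE B (Python) =====
-- def solution(A):
--     # one scan recording the boundaries where the distinct count reaches 2 and 3
--     seen = []
--     p2 = None
--     p3 = None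
--     for i, item in enumerate(A):
--         if item not in seen:
--             seen.append(item)
--             if len(seen) == 2:
--                 p2 = i
--             elif len(seen) == 3:
--                 p3 = i
--                 break
--     if p2 is None:
--         return 1
--     if p3 is None:
--         p3 = len(A)
--     return 1 + (p3 - p2)
-- ===== Notes on version B (the rewrite author's own statement) =====
-- stated objective: faster
-- what changed: B replaces A's per-element counter (incremented while the dedup list has length 2) with a single scan that records the indices where the distinct count first reaches 2 and 3 and returns 1 + (p3 - p2), breaking out of the loop as soon as the third distinct value appears.
import Mathlib
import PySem

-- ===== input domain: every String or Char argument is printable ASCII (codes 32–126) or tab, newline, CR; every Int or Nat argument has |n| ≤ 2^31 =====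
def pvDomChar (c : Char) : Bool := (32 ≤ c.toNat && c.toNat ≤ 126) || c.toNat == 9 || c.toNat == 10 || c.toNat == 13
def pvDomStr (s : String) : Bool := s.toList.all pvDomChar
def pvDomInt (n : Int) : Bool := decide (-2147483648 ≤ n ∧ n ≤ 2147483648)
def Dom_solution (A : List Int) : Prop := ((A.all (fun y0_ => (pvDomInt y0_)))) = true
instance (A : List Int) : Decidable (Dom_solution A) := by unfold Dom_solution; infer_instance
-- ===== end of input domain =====

-- B computes the same answer from the two transition boundaries (distinct count reaching 2 and 3) instead of A's per-element counter; objective: alternative.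

-- ===== PORT A =====
-- one loop step of A: membership-append, then the length-2 counting block
def stepA (s : List Int × Int) (item : Int) : List Int × Int :=
  let tmp := if item ∈ s.1 then s.1 else s.1 ++ [item]
  if tmp.length = 2 then
    if item ∈ tmp then (tmp, s.2 + 1)
    else (tmp.drop 1, (2 : Int))   -- pop(0); count = 2
  else (tmp, s.2)

def solution (A : List Int) : Int := (A.foldl stepA ([], 2)).2 - 1

-- ===== PORT B =====
-- B's scan: returns (p2, p3); breaks when the 3rd distinct value appears
def findP : List Int → Int → List Int → Option Int → Option Int × Option Int
  | [], _, _, p2 => (p2, none)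
  | item :: rest, i, seen, p2 =>
    if item ∈ seen then findP rest (i + 1) seen p2
    else
      let seen' := seen ++ [item]
      if seen'.length = 2 then findP rest (i + 1) seen' (some i)
      else if seen'.length = 3 then (p2, some i)
      else findP rest (i + 1) seen' p2

def solution_alt (A : List Int) : Int :=
  match findP A 0 [] none with
  | (none, _) => 1
  | (some q, p3) => 1 + (p3.getD (A.length : Int) - q)

-- ===== PRECONDITION & SPEC =====
def Spec_solution (A : List Int) (out : Int) : Prop := out = solution_alt A
instance (A : List Int) (out : Int) : Decidable (Spec_solution A out) := by unfold Spec_solution; infer_instance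

-- ===== CLAIM (what is proved, stated in full; the proofs are below) =====
def Claim_equal_solution : Prop := ∀ (A : List Int), Dom_solution A → Spec_solution A (solution A)

-- ===== LEMMAS AND PROOFS =====

-- once tmp_list has ≥ 3 elements, A's count never changes
theorem lemA3 (t : List Int) : ∀ (tmp : List Int) (c : Int), 3 ≤ tmp.length →
    (List.foldl stepA (tmp, c) t).2 = c := by
  induction t with
  | nil => intro tmp c _; rfl
  | cons z u ih =>
    intro tmp c h
    by_cases hz : z ∈ tmp
    · simp only [List.foldl_cons, stepA, if_pos hz]
      rw [if_neg (by omega)]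
      exact ih tmp c h
    · simp only [List.foldl_cons, stepA, if_neg hz]
      rw [if_neg (by simp; omega)]
      exact ih _ c (by simp; omega)

-- while tmp_list has exactly 2 elements, A adds 1 per leading element already seen, then freezes
theorem lemA2 (t : List Int) : ∀ (s : List Int) (c : Int), s.length = 2 →
    (List.foldl stepA (s, c) t).2
      = c + ((t.takeWhile (fun z => decide (z ∈ s))).length : Int) := by
  induction t with
  | nil => intro s c _; simp
  | cons z u ih =>
    intro s c h
    by_cases hz : z ∈ s
    · simp only [List.foldl_cons, stepA, if_pos hz, if_pos h, List.takeWhile_cons,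
        decide_eq_true hz]
      rw [ih s (c + 1) h]
      simp; ring
    · simp only [List.foldl_cons, stepA, if_neg hz]
      rw [if_neg (by simp [h])]
      rw [lemA3 u _ c (by simp [h])]
      simp [hz]

-- B's phase-2 scan: p3 is the index of the first element outside `seen` (none if all inside)
theorem lemB2 (t : List Int) : ∀ (s : List Int) (i : Int) (q : Int), s.length = 2 →
    findP t i s (some q)
      = (some q,
          if (t.dropWhile (fun z => decide (z ∈ s))).isEmpty then none
          else some (i + ((t.takeWhile (fun z => decide (z ∈ s))).length : Int))) := by
  induction t with
  | nil => intro s i q _; simp [findP]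
  | cons z u ih =>
    intro s i q h
    by_cases hz : z ∈ s
    · simp only [findP, if_pos hz]
      rw [ih s (i + 1) q h]
      simp [hz]
      split_ifs with hc
      · rfl
      · congr 1; ring
    · simp only [findP, if_neg hz]
      rw [if_neg (by simp [h]), if_pos (by simp [h])]
      simp [hz]

-- phase-1 bridge: starting from one seen value x, both sides agree
theorem main1 (r : List Int) : ∀ (x : Int) (i : Int),
    (List.foldl stepA ([x], 2) r).2 - 1
      = (match findP r i [x] none with
         | (none, _) => 1
         | (some q, p3) => 1 + (p3.getD (i + (r.length : Int)) - q)) := by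
  induction r with
  | nil => intro x i; simp [findP]
  | cons a t ih =>
    intro x i
    by_cases ha : a ∈ [x]
    · have hx : a = x := by simpa using ha
      simp only [List.foldl_cons, stepA, if_pos ha]
      rw [if_neg (by simp)]
      simp only [findP, if_pos ha]
      rw [ih x (i + 1)]
      rcases hp : findP t (i + 1) [x] none with ⟨p2, p3⟩
      cases p2 with
      | none => simp
      | some q =>
        simp only []
        cases p3 with
        | none => simp; ring_nf
        | some v => simp
    · simp only [List.foldl_cons, stepA, if_neg ha]
      have h2 : ([x] ++ [a]).length = 2 := by simp
      rw [if_pos h2, if_pos (by simp)]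
      rw [lemA2 t ([x] ++ [a]) (2 + 1) h2]
      simp only [findP, if_neg ha]
      rw [lemB2 t ([x] ++ [a]) (i + 1) i h2]
      by_cases hd : (t.dropWhile (fun z => decide (z ∈ [x] ++ [a]))).isEmpty
      · rw [if_pos hd]
        have : t.takeWhile (fun z => decide (z ∈ [x] ++ [a])) = t := by
          have := List.takeWhile_append_dropWhile (p := fun z => decide (z ∈ [x] ++ [a])) (l := t)
          rw [List.isEmpty_iff.mp hd] at this; simpa using this
        rw [this]; simp; ring
      · rw [if_neg hd]; simp; ring

-- ===== VERDICT (by name: the statement is the Claim_ definition above) =====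
theorem solution_spec : Claim_equal_solution := by
  intro A _
  unfold Spec_solution
  cases A with
  | nil => rfl
  | cons x r =>
    unfold solution solution_alt
    simp only [List.foldl_cons, stepA, findP]
    rw [if_neg (show ¬ (x ∈ ([] : List Int)) by simp)]
    rw [if_neg (show ¬ (([] : List Int) ++ [x]).length = 2 by simp)]
    rw [if_neg (show ¬ (([] : List Int) ++ [x]).length = 3 by simp)]
    simp only [List.nil_append]
    rw [main1 r x (0 + 1)]
    rcases hp : findP r (0 + 1) [x] none with ⟨p2, p3⟩
    cases p2 with
    | none => simp
    | some q =>
      cases p3 with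
      | none => simp; ring_nf
      | some v => simp
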